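-- pv_equiv track=rewrite | github.com/echoloop96/Informational-Genomics | ProgettoModelli.py | get_repeats
-- ===== SOURCE A (Python) =====
-- def get_kmers(Seq, k):
--
--     ''' Returns the set of k-mers that occur in a given sequence
--         ----------
--         Paramaters:
--             Seq(Bio.Seq)
--             K(int)
--         Returns:
--             set(str)
--     '''
--
--     kmers = set()
--     for i in range(len(Seq) - k +1):
--         kmers.add(str(Seq[i:i+k]))
--     return kmers
--
-- def count_occurrences(Seq,w):
--
--     '''
--         Counts the number of occurences of w in Seq
--         --------
--         Parameters:
--             Seq (Bio.Seq)
--             w (str)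
--         Returns:
--             int : number of w in Seq
--     '''
--
--     count = 0
--     for i in range(len(Seq) -len(w) +1):
--         for j in range(len(w)):
--             if Seq[i+j] != w[j]:
--                 break
--         else:
--             count += 1
--     return count
--
-- def get_repeats(Seq,k):
--
--     '''
--       Returns a list of repeats in Seq
--       -----------
--       Parameters:
--           Seq(Bio.Seq)
--           k(int)
--       --------
--       Returns:
--           sorted(list[str]) :repeats
--
--     '''
--
--     kmers = get_kmers(Seq,k)
--     repeats = []
--     for kmer in kmers:
--         m = count_occurrences(Seq,kmer)
--         if m>2:
--             repeats.append(kmer)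
--     return sorted(repeats)
-- ===== SOURCE B (Python) =====
-- def get_repeats(Seq, k):
--     # Collect every k-mer start position's substring, sort, then one grouping
--     # pass: a k-mer whose run in the sorted list is longer than 2 is a repeat.
--     subs = sorted(str(Seq[i:i + k]) for i in range(len(Seq) - k + 1))
--     out = []
--     while subs:
--         w = subs[0]
--         run = 1
--         while run < len(subs) and subs[run] == w:
--             run += 1
--         if run > 2:
--             out.append(w)
--         subs = subs[run:]
--     return out
-- ===== Notes on version B (the rewrite author's own statement) =====
-- stated objective: faster
-- what changed: Instead of A's per-distinct-k-mer full rescan of the sequence (count_occurrences), B lists every k-mer substring once, sorts the list, and keeps in one grouping pass the k-mers whose run length exceeds 2; the result is already sorted.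
-- outside the precondition, e.g. on get_repeats('aaaa', -2): A returns ['', 'aa'], B returns ['']
import Mathlib
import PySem

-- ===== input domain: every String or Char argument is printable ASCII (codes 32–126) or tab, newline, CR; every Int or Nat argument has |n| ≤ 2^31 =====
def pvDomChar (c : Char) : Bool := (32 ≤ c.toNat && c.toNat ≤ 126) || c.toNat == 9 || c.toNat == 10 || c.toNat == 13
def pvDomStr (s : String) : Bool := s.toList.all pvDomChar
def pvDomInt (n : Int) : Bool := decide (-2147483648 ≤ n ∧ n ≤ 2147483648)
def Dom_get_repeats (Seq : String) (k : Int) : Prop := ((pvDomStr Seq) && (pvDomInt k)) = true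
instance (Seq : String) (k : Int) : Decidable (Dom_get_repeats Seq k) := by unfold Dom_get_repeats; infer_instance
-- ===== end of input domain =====

-- B replaces A's per-k-mer rescans of the sequence with "sort all k-mer substrings, then one
-- grouping pass keeping the k-mers whose run is longer than 2" (a different decomposition;
-- neither version mutates its arguments).

-- ===== PORT A =====

-- the inner 'for j in range(len(w)): if Seq[i+j] != w[j]: break' of count_occurrences;
-- returns true iff the loop fell through (the for-else fired). The indices i+j and j are
-- always in range where this is called, so pyGetD with an arbitrary default is exact.
def pvCoInner (s ws : List Char) (i : Int) : List Int → Bool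
  | [] => true
  | j :: rest =>
      if PySem.List.pyGetD s (i + j) ' ' ≠ PySem.List.pyGetD ws j ' ' then false
      else pvCoInner s ws i rest

def count_occurrences (Seq w : String) : Int :=
  let s := Seq.toList
  let ws := w.toList
  (PySem.List.pyRange 0 ((s.length : Int) - (ws.length : Int) + 1) 1).foldl
    (fun count i =>
      if pvCoInner s ws i (PySem.List.pyRange 0 ((ws.length : Int)) 1) then count + 1 else count) 0

def get_kmers (Seq : String) (k : Int) : PySem.Set String :=
  let s := Seq.toList
  (PySem.List.pyRange 0 ((s.length : Int) - k + 1) 1).foldl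
    (fun kmers i => PySem.Set.add kmers (String.ofList (PySem.List.slice s (some i) (some (i + k))))) PySem.Set.empty

-- Python iterates the set 'kmers' in hash order; the final sorted(...) with distinct elements
-- makes the result independent of that order (sorted_eq_of_perm_of_pairwise_lt in the proof),
-- so iterating in the Set's insertion order is exact.
def get_repeats (Seq : String) (k : Int) : List String :=
  let kmers := get_kmers Seq k
  let repeats := kmers.foldl
    (fun acc kmer => if count_occurrences Seq kmer > 2 then acc ++ [kmer] else acc) []
  PySem.List.sorted repeats (fun x => x) false

-- ===== PORT B =====

-- Source B's outer while loop: measure the leading run of the sorted list, keep its k-mer if the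
-- run is longer than 2, continue on the remainder ('subs = subs[run:]').
def pvGroupKeep : List String → List String
  | [] => []
  | w :: rest =>
      let run := 1 + (rest.takeWhile (fun x => x == w)).length
      let rest' := rest.dropWhile (fun x => x == w)
      if run > 2 then w :: pvGroupKeep rest' else pvGroupKeep rest'
  termination_by l => l.length
  decreasing_by
    all_goals simp only [List.length_cons]
    all_goals exact Nat.lt_succ_of_le (List.length_dropWhile_le _ _)

def get_repeats_alt (Seq : String) (k : Int) : List String :=
  let s := Seq.toList
  let subs := PySem.List.sorted
    ((PySem.List.pyRange 0 ((s.length : Int) - k + 1) 1).map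
      (fun i => String.ofList (PySem.List.slice s (some i) (some (i + k))))) (fun x => x) false
  pvGroupKeep subs

-- ===== PRECONDITION & SPEC =====
-- Pre_ excludes k < 0, outside the natural domain of a k-mer length: there A's slices
-- degenerate (fragments of length len(Seq)+k and empty strings) and its value is an accident
-- of slice arithmetic that B's substring list does not reproduce (A still returns a value).
def Pre_get_repeats (Seq : String) (k : Int) : Prop := 0 ≤ k
instance (Seq : String) (k : Int) : Decidable (Pre_get_repeats Seq k) := by
  unfold Pre_get_repeats; infer_instance

def pvWitness_get_repeats : String × Int := ("abcabcabc", 3)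

def Spec_get_repeats (Seq : String) (k : Int) (out : List String) : Prop := out = get_repeats_alt Seq k
instance (Seq : String) (k : Int) (out : List String) : Decidable (Spec_get_repeats Seq k out) := by unfold Spec_get_repeats; infer_instance

-- ===== CLAIM (what is proved, stated in full; the proofs are below) =====
def Claim_equal_get_repeats : Prop := ∀ (Seq : String) (k : Int), Dom_get_repeats Seq k → Pre_get_repeats Seq k → Spec_get_repeats Seq k (get_repeats Seq k)

-- ===== LEMMAS AND PROOFS =====

-- the multiset of k-mer substrings, one per start position (a name for the list that both
-- ports build: A deduplicates it into a set, B sorts it)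
def pvSubs (Seq : String) (k : Int) : List String :=
  (PySem.List.pyRange 0 ((Seq.toList.length : Int) - k + 1) 1).map
    (fun i => String.ofList (PySem.List.slice Seq.toList (some i) (some (i + k))))

theorem pvCoInner_eq_all (s ws : List Char) (i : Int) (js : List Int) :
    pvCoInner s ws i js
      = js.all (fun j => PySem.List.pyGetD s (i + j) ' ' == PySem.List.pyGetD ws j ' ') := by
  induction js with
  | nil => rfl
  | cons j rest ih =>
      simp only [pvCoInner, List.all_cons, ih]
      by_cases h : PySem.List.pyGetD s (i + j) ' ' = PySem.List.pyGetD ws j ' ' <;> simp [h]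

-- an in-range slice of span k has length k
theorem pvSubs_length {u : List Char} {k : Int} (hk : 0 ≤ k) {i : Int}
    (hi : 0 ≤ i) (hin : i + k ≤ (u.length : Int)) :
    (PySem.List.slice u (some i) (some (i + k))).length = k.toNat := by
  rw [PySem.List.slice_toNat u hi (by omega)]
  simp [List.length_take, List.length_drop]
  omega

-- characterwise agreement on the window at i ↔ the slice there equals ws
theorem pvPointwise_iff_slice {u ws : List Char} {i : Int}
    (hi : 0 ≤ i) (hin : i + (ws.length : Int) ≤ (u.length : Int)) :
    ((∀ j : Int, 0 ≤ j → j < (ws.length : Int) →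
        PySem.List.pyGetD u (i + j) ' ' = PySem.List.pyGetD ws j ' ')
      ↔ PySem.List.slice u (some i) (some (i + (ws.length : Int))) = ws) := by
  rw [PySem.List.slice_toNat u hi (by omega)]
  have hnn : ((i + ws.length).toNat - i.toNat) = ws.length := by omega
  rw [hnn]
  constructor
  · intro H
    apply List.ext_getElem
    · simp; omega
    · intro jn h1 h2
      have := H (jn : Int) (by omega) (by simp at h1; omega)
      rw [PySem.List.pyGetD_of_nonneg u ' ' (by omega), PySem.List.pyGetD_of_nonneg ws ' ' (by omega)] at this
      have hj : jn < ws.length := by simp at h1; omega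
      rw [List.getD_eq_getElem u ' ' (by omega), List.getD_eq_getElem ws ' ' (by omega)] at this
      have e1 : (i + (jn : Int)).toNat = i.toNat + jn := by omega
      simp only [e1, Int.toNat_natCast] at this
      simpa [List.getElem_take, List.getElem_drop] using this
  · intro H j hj0 hjm
    rw [PySem.List.pyGetD_of_nonneg u ' ' (by omega), PySem.List.pyGetD_of_nonneg ws ' ' (by omega)]
    have hj : j.toNat < ws.length := by omega
    rw [List.getD_eq_getElem u ' ' (by omega), List.getD_eq_getElem ws ' ' (by omega)]
    have := List.getElem_of_eq H.symm hj
    simp only [List.getElem_take, List.getElem_drop] at this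
    rw [this]
    congr 1
    omega

-- the inner for-else fires at i ↔ the slice at i equals ws
theorem pvCoInner_iff_slice {u ws : List Char} {i : Int}
    (hi : 0 ≤ i) (hin : i + (ws.length : Int) ≤ (u.length : Int)) :
    (pvCoInner u ws i (PySem.List.pyRange 0 ((ws.length : Int)) 1) = true
      ↔ PySem.List.slice u (some i) (some (i + (ws.length : Int))) = ws) := by
  rw [pvCoInner_eq_all, List.all_eq_true]
  have hstep : (∀ j ∈ PySem.List.pyRange 0 ((ws.length : Int)) 1,
      (PySem.List.pyGetD u (i + j) ' ' == PySem.List.pyGetD ws j ' ') = true)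
      ↔ (∀ j : Int, 0 ≤ j → j < (ws.length : Int) →
        PySem.List.pyGetD u (i + j) ' ' = PySem.List.pyGetD ws j ' ') := by
    constructor
    · intro H j h0 hm
      exact beq_iff_eq.mp (H j (by rw [PySem.List.mem_pyRange_one]; omega))
    · intro H j hj
      rw [PySem.List.mem_pyRange_one] at hj
      exact beq_iff_eq.mpr (H j hj.1 hj.2)
  rw [hstep]
  exact pvPointwise_iff_slice hi hin

-- A's count_occurrences of a k-mer = its multiplicity in the substring list
theorem pvCount_eq (Seq : String) (k : Int) (hk : 0 ≤ k) (w : String) (hw : w ∈ pvSubs Seq k) :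
    count_occurrences Seq w = ((pvSubs Seq k).count w : Int) := by
  obtain ⟨i0, hi0, hfw⟩ := List.mem_map.mp hw
  rw [PySem.List.mem_pyRange_one] at hi0
  have hws : w.toList = PySem.List.slice Seq.toList (some i0) (some (i0 + k)) := by
    rw [← hfw]; simp
  have hlen : (w.toList.length : Int) = k := by
    rw [hws, pvSubs_length hk hi0.1 (by omega)]; omega
  unfold count_occurrences
  simp only
  rw [hlen]
  rw [PySem.List.foldl_if_add_one (fun i => pvCoInner Seq.toList w.toList i (PySem.List.pyRange 0 k 1))]
  rw [zero_add]
  unfold pvSubs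
  rw [List.count, List.countP_map]
  congr 1
  apply List.countP_congr
  intro i hi
  rw [PySem.List.mem_pyRange_one] at hi
  have hiff := pvCoInner_iff_slice (u := Seq.toList) (ws := w.toList) (i := i) hi.1 (by omega)
  rw [hlen] at hiff
  simp only [Function.comp]
  by_cases hq : PySem.List.slice Seq.toList (some i) (some (i + k)) = w.toList
  · have h1 : pvCoInner Seq.toList w.toList i (PySem.List.pyRange 0 k 1) = true := hiff.mpr hq
    rw [h1]
    have hv : String.ofList (PySem.List.slice Seq.toList (some i) (some (i + k))) = w := by
      rw [hq, String.ofList_toList]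
    simp [hv]
  · have h1 : pvCoInner Seq.toList w.toList i (PySem.List.pyRange 0 k 1) = false := by
      cases h : pvCoInner Seq.toList w.toList i (PySem.List.pyRange 0 k 1)
      · rfl
      · exact absurd (hiff.mp h) hq
    rw [h1]
    have hv : String.ofList (PySem.List.slice Seq.toList (some i) (some (i + k))) ≠ w := by
      intro he
      apply hq
      rw [← he]; simp
    simp [hv]

-- run structure of a ≤-sorted list w :: rest: everything past the leading run is > w
theorem pvDrop_gt {w : String} {rest : List String} (hM : (w :: rest).Pairwise (· ≤ ·)) :
    ∀ x ∈ rest.dropWhile (fun x => x == w), w < x := by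
  rw [List.pairwise_cons] at hM
  cases hd : rest.dropWhile (fun x => x == w) with
  | nil => intro x hx; simp at hx
  | cons y t =>
      have hy : ¬ (y == w) = true := by
        have := List.head_dropWhile_not (fun x => x == w) (l := rest) (by rw [hd]; simp)
        simpa [hd] using this
      have hyrest : y ∈ rest := by
        have : y ∈ rest.dropWhile (fun x => x == w) := by rw [hd]; simp
        exact (List.dropWhile_sublist _).subset this
      have hne : y ≠ w := fun he => hy (by simp [he])
      have hwy : w < y := lt_of_le_of_ne (hM.1 y hyrest) hne.symm
      intro x hx
      rcases List.mem_cons.mp hx with rfl | hxt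
      · exact hwy
      · have hsub : (y :: t).Sublist rest := by
          rw [← hd]; exact List.dropWhile_sublist _
        have hp : (y :: t).Pairwise (· ≤ ·) := hM.2.sublist hsub
        exact lt_of_lt_of_le hwy ((List.pairwise_cons.mp hp).1 x hxt)

-- on a sorted list, the head's multiplicity is the length of its leading run
theorem pvCount_head {w : String} {rest : List String} (hM : (w :: rest).Pairwise (· ≤ ·)) :
    (w :: rest).count w = 1 + (rest.takeWhile (fun x => x == w)).length := by
  have h0 : (rest.dropWhile (fun x => x == w)).count w = 0 := by
    rw [List.count_eq_zero]
    intro hmem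
    exact absurd rfl (ne_of_gt (pvDrop_gt hM w hmem))
  have htw : (rest.takeWhile (fun x => x == w)).count w
      = (rest.takeWhile (fun x => x == w)).length := by
    rw [List.count_eq_length]
    intro b hb
    have h2 : (b == w) = true := List.mem_takeWhile_imp (p := fun z => z == w) (l := rest) hb
    exact (beq_iff_eq.mp h2).symm
  calc (w :: rest).count w = rest.count w + 1 := by rw [List.count_cons_self]
    _ = 1 + (rest.takeWhile (fun x => x == w)).length := by
        conv_lhs => rw [← List.takeWhile_append_dropWhile (p := fun x => x == w) (l := rest)]
        rw [List.count_append, htw, h0]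
        omega

theorem pvCount_rest {w : String} {rest : List String} (x : String) (hx : x ≠ w) :
    (w :: rest).count x = (rest.dropWhile (fun x => x == w)).count x := by
  have htw : (rest.takeWhile (fun x => x == w)).count x = 0 := by
    rw [List.count_eq_zero]
    intro hmem
    exact hx (by simpa using List.mem_takeWhile_imp hmem)
  have h1 : (w :: rest).count x = rest.count x := by
    rw [List.count_cons]
    simp [Ne.symm hx]
  rw [h1]
  conv_lhs => rw [← List.takeWhile_append_dropWhile (p := fun x => x == w) (l := rest)]
  rw [List.count_append, htw]
  omega

theorem pvRest'_pairwise {w : String} {rest : List String} (hM : (w :: rest).Pairwise (· ≤ ·)) :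
    (rest.dropWhile (fun x => x == w)).Pairwise (· ≤ ·) :=
  ((List.pairwise_cons.mp hM).2).sublist (List.dropWhile_sublist _)

-- grouping over a ≤-sorted list keeps exactly the strings of multiplicity > 2
theorem pvGroupKeep_mem_aux : ∀ (n : Nat) (M : List String), M.length ≤ n → M.Pairwise (· ≤ ·) →
    ∀ x, (x ∈ pvGroupKeep M ↔ 2 < M.count x) := by
  intro n
  induction n with
  | zero =>
      intro M hn _ x
      rw [Nat.le_zero, List.length_eq_zero_iff] at hn
      subst hn
      simp [pvGroupKeep]
  | succ n ih =>
      intro M hn hM x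
      cases M with
      | nil => simp [pvGroupKeep]
      | cons w rest =>
          have hlen : (rest.dropWhile (fun y => y == w)).length ≤ n := by
            have := List.length_dropWhile_le (fun y : String => y == w) rest
            simp at hn
            omega
          have ihr := ih (rest.dropWhile (fun y => y == w)) hlen (pvRest'_pairwise hM)
          have h0 : (rest.dropWhile (fun y => y == w)).count w = 0 := by
            rw [List.count_eq_zero]
            intro hm; exact absurd rfl (ne_of_gt (pvDrop_gt hM w hm))
          rw [pvGroupKeep]
          split_ifs with hrun
          · by_cases hxw : x = w
            · subst hxw
              have hnot : ¬ x ∈ pvGroupKeep (rest.dropWhile (fun y => y == x)) := by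
                intro hmem
                rw [ihr x] at hmem
                omega
              have hcnt : 2 < (x :: rest).count x := by
                rw [pvCount_head hM]; omega
              exact iff_of_true (List.mem_cons_self) hcnt
            · rw [List.mem_cons]
              simp only [hxw, false_or]
              rw [ihr x, pvCount_rest x hxw]
          · by_cases hxw : x = w
            · subst hxw
              have hnot : ¬ x ∈ pvGroupKeep (rest.dropWhile (fun y => y == x)) := by
                intro hmem
                rw [ihr x] at hmem
                omega
              have h2 : ¬ 2 < (x :: rest).count x := by
                rw [pvCount_head hM]; omega
              exact iff_of_false hnot h2
            · rw [ihr x, pvCount_rest x hxw]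

theorem pvGroupKeep_mem {M : List String} (hM : M.Pairwise (· ≤ ·)) (x : String) :
    x ∈ pvGroupKeep M ↔ 2 < M.count x :=
  pvGroupKeep_mem_aux M.length M le_rfl hM x

theorem pvGroupKeep_pairwise_aux : ∀ (n : Nat) (M : List String), M.length ≤ n →
    M.Pairwise (· ≤ ·) → (pvGroupKeep M).Pairwise (· < ·) := by
  intro n
  induction n with
  | zero =>
      intro M hn _
      rw [Nat.le_zero, List.length_eq_zero_iff] at hn
      subst hn
      simp [pvGroupKeep]
  | succ n ih =>
      intro M hn hM
      cases M with
      | nil => simp [pvGroupKeep]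
      | cons w rest =>
          have hlen : (rest.dropWhile (fun y => y == w)).length ≤ n := by
            have := List.length_dropWhile_le (fun y : String => y == w) rest
            simp at hn
            omega
          have ihr := ih (rest.dropWhile (fun y => y == w)) hlen (pvRest'_pairwise hM)
          rw [pvGroupKeep]
          split_ifs with hrun
          · rw [List.pairwise_cons]
            refine ⟨?_, ihr⟩
            intro x hx
            have hxr : x ∈ rest.dropWhile (fun y => y == w) := by
              have hmem := (pvGroupKeep_mem (pvRest'_pairwise hM) x).mp hx
              exact List.count_pos_iff.mp (by omega)
            exact pvDrop_gt hM x hxr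
          · exact ihr

theorem pvGroupKeep_pairwise {M : List String} (hM : M.Pairwise (· ≤ ·)) :
    (pvGroupKeep M).Pairwise (· < ·) :=
  pvGroupKeep_pairwise_aux M.length M le_rfl hM

-- the assembled equivalence for 0 ≤ k
theorem pvMain (Seq : String) (k : Int) (hk : 0 ≤ k) :
    get_repeats Seq k = get_repeats_alt Seq k := by
  unfold get_repeats get_repeats_alt get_kmers
  simp only
  rw [← PySem.Set.update_map_eq_foldl_add, PySem.Set.update_empty]
  rw [PySem.List.foldl_append_ite_eq_filter (p := fun kmer => count_occurrences Seq kmer > 2)]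
  rw [List.nil_append]
  have hMsort : (PySem.List.sorted (pvSubs Seq k) (fun x => x) false).Pairwise (· ≤ ·) :=
    PySem.List.sorted_pairwise (pvSubs Seq k) (fun x => x)
  have hcnt : ∀ x, (PySem.List.sorted (pvSubs Seq k) (fun x => x) false).count x
      = (pvSubs Seq k).count x := fun x =>
    (PySem.List.sorted_perm (pvSubs Seq k) (fun x => x) false).count_eq x
  have hfq : (PySem.Set.ofList (pvSubs Seq k)).filter
        (fun x => decide (count_occurrences Seq x > 2))
      = (PySem.Set.ofList (pvSubs Seq k)).filter
        (fun x => decide (2 < (pvSubs Seq k).count x)) := by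
    apply List.filter_congr
    intro x hx
    have hxmem : x ∈ pvSubs Seq k := (PySem.Set.mem_ofList _ _).mp hx
    rw [pvCount_eq Seq k hk x hxmem]
    simp only [decide_eq_decide]
    omega
  show PySem.List.sorted ((PySem.Set.ofList (pvSubs Seq k)).filter
      (fun x => decide (count_occurrences Seq x > 2))) (fun x => x) false
    = pvGroupKeep (PySem.List.sorted (pvSubs Seq k) (fun x => x) false)
  rw [hfq]
  apply PySem.List.sorted_eq_of_perm_of_pairwise_lt
  · rw [List.perm_ext_iff_of_nodup]
    · intro a
      rw [pvGroupKeep_mem hMsort a, hcnt a, List.mem_filter]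
      constructor
      · intro h
        exact ⟨(PySem.Set.mem_ofList _ _).mpr (List.count_pos_iff.mp (by omega)),
          by simpa using (by omega : 2 < (pvSubs Seq k).count a)⟩
      · intro ⟨_, h2⟩
        simpa using h2
    · exact (pvGroupKeep_pairwise hMsort).imp ne_of_lt
    · exact ((PySem.Set.nodup_ofList _).filter _)
  · exact pvGroupKeep_pairwise hMsort

-- ===== VERDICT (by name: the statement is the Claim_ definition above) =====
theorem get_repeats_spec : Claim_equal_get_repeats := by
  intro Seq k _ hk
  unfold Spec_get_repeats
  exact pvMain Seq k hk
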